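-- pv_equiv track=rewrite | github.com/netotz/codecamp | onlinejudge/beiju_text.py | get_beiju
-- ===== SOURCE A (Python) =====
-- from collections import deque
--
-- def get_beiju(string: str) -> str:
--     HOME = '['
--     END = ']'
--     string += END
--
--     i = 0
--     homeindex = -1
--     beiju = deque()
--     while i < len(string):
--         char = string[i]
--         if char == HOME or char == END:
--             if homeindex >= 0:
--                 beiju.rotate(i - homeindex - 1)
--                 homeindex = -1
--             else:
--                 homeindex = i
--             if char == HOME:
--                 homeindex = i
--         else:
--             beiju.append(char)
--         i += 1
--     return ''.join(beiju)
-- ===== SOURCE B (Python) =====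
-- def get_beiju(string: str) -> str:
--     # One pass with a run buffer instead of a deque with rotate arithmetic:
--     # run is None in append mode; any bracket while in append mode opens a
--     # front run; ']' flushes the run to the front and returns to append mode,
--     # '[' flushes and immediately opens a new front run (matching A exactly).
--     out = []
--     run = None
--     for char in string:
--         if char == '[' or char == ']':
--             if run is None:
--                 run = []
--             else:
--                 out[:0] = run
--                 run = [] if char == '[' else None
--         elif run is None:
--             out.append(char)
--         else:
--             run.append(char)
--     if run is not None:
--         out[:0] = run
--     return ''.join(out)
-- ===== Notes on version B (the rewrite author's own statement) =====
-- stated objective: simpler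
-- what changed: Replaced the deque with index-tracked rotate arithmetic and an appended sentinel bracket by a single pass with a run buffer: typed runs are appended at the back in append mode and prepended in order at the front when a bracket flushes the open run.
import Mathlib
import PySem

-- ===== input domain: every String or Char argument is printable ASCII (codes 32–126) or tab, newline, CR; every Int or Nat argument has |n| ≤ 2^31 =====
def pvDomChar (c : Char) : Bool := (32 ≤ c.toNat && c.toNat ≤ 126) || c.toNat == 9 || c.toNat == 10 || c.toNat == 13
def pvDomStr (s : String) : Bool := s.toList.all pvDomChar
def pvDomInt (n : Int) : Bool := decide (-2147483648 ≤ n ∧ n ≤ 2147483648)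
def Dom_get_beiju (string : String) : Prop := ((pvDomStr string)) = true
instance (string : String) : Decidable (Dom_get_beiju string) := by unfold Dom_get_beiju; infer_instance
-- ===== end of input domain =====

-- B replaces A's deque + rotate-by-index arithmetic + appended ']' sentinel by a
-- one-pass state machine with a run buffer (objective: simpler).

-- ===== PORT A =====
-- deque.rotate(k): right-rotation by k modulo the length (Python-exact for the
-- k ≥ 0 values A passes).
def pvRotate (l : List Char) (k : Int) : List Char :=
  if l.isEmpty then l
  else l.drop (l.length - (PySem.Int.mod k l.length).toNat)
        ++ l.take (l.length - (PySem.Int.mod k l.length).toNat)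

-- the while-loop of A: state i, homeindex, beiju; the inner `if c = '[' then i else i`
-- mirrors Python's `homeindex = i` in the else-branch followed by `if char == HOME: homeindex = i`
def pvLoopA : List Char → Int → Int → List Char → List Char
  | [], _, _, beiju => beiju
  | c :: rest, i, homeindex, beiju =>
    if c = '[' ∨ c = ']' then
      if homeindex ≥ 0 then
        pvLoopA rest (i + 1) (if c = '[' then i else -1) (pvRotate beiju (i - homeindex - 1))
      else
        pvLoopA rest (i + 1) (if c = '[' then i else i) beiju
    else
      pvLoopA rest (i + 1) homeindex (beiju ++ [c])

def get_beiju (string : String) : String :=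
  String.ofList (pvLoopA (string.toList ++ [']']) 0 (-1) [])

-- ===== PORT B =====
-- the for-loop of B: out, and run = none (append mode) / some buffer (front run open)
def pvLoopB : List Char → List Char → Option (List Char) → List Char
  | [], out, none => out
  | [], out, some run => run ++ out
  | c :: rest, out, buf =>
    if c = '[' ∨ c = ']' then
      match buf with
      | none => pvLoopB rest out (some [])
      | some run => pvLoopB rest (run ++ out) (if c = '[' then some [] else none)
    else
      match buf with
      | none => pvLoopB rest (out ++ [c]) none
      | some run => pvLoopB rest out (some (run ++ [c]))

def get_beiju_alt (string : String) : String :=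
  String.ofList (pvLoopB string.toList [] none)

-- ===== PRECONDITION & SPEC =====
def Spec_get_beiju (string : String) (out : String) : Prop := out = get_beiju_alt string
instance (string : String) (out : String) : Decidable (Spec_get_beiju string out) := by unfold Spec_get_beiju; infer_instance

-- ===== CLAIM (what is proved, stated in full; the proofs are below) =====
def Claim_equal_get_beiju : Prop := ∀ (string : String), Dom_get_beiju string → Spec_get_beiju string (get_beiju string)

-- ===== LEMMAS AND PROOFS =====

-- rotating the last `run.length` elements of `out ++ run` to the front
lemma pvRotate_append (out run : List Char) :
    pvRotate (out ++ run) (run.length : Int) = run ++ out := by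
  rcases eq_or_ne (out ++ run) [] with h | h
  · rcases List.append_eq_nil_iff.mp h with ⟨h1, h2⟩
    subst h1; subst h2; simp [pvRotate]
  · have hlen : 0 < (out ++ run).length := List.length_pos_iff.mpr h
    rw [pvRotate, if_neg (by simpa [List.isEmpty_iff] using h)]
    rcases eq_or_ne out [] with hout | hout
    · subst hout
      rw [PySem.Int.mod_eq_emod_of_pos (by exact_mod_cast hlen)]
      simp
    · have hlt : (run.length : Int) < ((out ++ run).length : Int) := by
        have : 0 < out.length := List.length_pos_iff.mpr hout
        simp only [List.length_append]; omega
      rw [PySem.Int.mod_eq_emod_of_pos (by omega),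
        Int.emod_eq_of_lt (by positivity) hlt]
      have hsub : (out ++ run).length - ((run.length : Int)).toNat = out.length := by
        simp [List.length_append]
      rw [hsub, List.drop_left, List.take_left]

-- loop invariant relating A's state (i, homeindex, deque) to B's state (out, run buffer):
-- while a run is open, A's deque is out ++ run and homeindex = i - 1 - |run|
lemma loopA_eq_loopB (cs : List Char) : ∀ (i : Int) (out run : List Char),
    ((run.length : Int) + 1 ≤ i →
      pvLoopA (cs ++ [']']) i (i - 1 - run.length) (out ++ run) = pvLoopB cs out (some run)) ∧
    (0 ≤ i → pvLoopA (cs ++ [']']) i (-1) out = pvLoopB cs out none) := by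
  induction cs with
  | nil =>
    intro i out run
    refine ⟨fun hi => ?_, fun hi => ?_⟩
    · rw [List.nil_append, pvLoopA, if_pos (Or.inr rfl),
        if_pos (show i - 1 - (run.length : Int) ≥ 0 by omega)]
      have : i - (i - 1 - (run.length : Int)) - 1 = (run.length : Int) := by omega
      rw [this, pvRotate_append, pvLoopA, pvLoopB]
    · rw [List.nil_append, pvLoopA, if_pos (Or.inr rfl),
        if_neg (show ¬ (-1 : Int) ≥ 0 by omega), pvLoopA, pvLoopB]
  | cons c cs ih =>
    intro i out run
    refine ⟨fun hi => ?_, fun hi => ?_⟩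
    · rw [List.cons_append, pvLoopA]
      by_cases hc : c = '[' ∨ c = ']'
      · rw [if_pos hc, if_pos (show i - 1 - (run.length : Int) ≥ 0 by omega)]
        have hrot : i - (i - 1 - (run.length : Int)) - 1 = (run.length : Int) := by omega
        rw [hrot, pvRotate_append, pvLoopB, if_pos hc]
        by_cases hO : c = '['
        · rw [if_pos hO, if_pos hO]
          have h1 := (ih (i + 1) (run ++ out) []).1 (by simp; omega)
          simpa using h1
        · rw [if_neg hO, if_neg hO]
          exact (ih (i + 1) (run ++ out) []).2 (by omega)
      · rw [if_neg hc, pvLoopB, if_neg hc]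
        have h1 := (ih (i + 1) out (run ++ [c])).1 (by simp; omega)
        have harg : (i + 1) - 1 - (((run ++ [c]).length : Nat) : Int) = i - 1 - (run.length : Int) := by
          simp; omega
        rw [harg] at h1
        simpa [List.append_assoc] using h1
    · rw [List.cons_append, pvLoopA]
      by_cases hc : c = '[' ∨ c = ']'
      · rw [if_pos hc, if_neg (show ¬ (-1 : Int) ≥ 0 by omega)]
        have hhx : (if c = '[' then i else i) = i := by
          by_cases hO : c = '[' <;> simp [hO]
        rw [hhx, pvLoopB, if_pos hc]
        have h1 := (ih (i + 1) out []).1 (by simp; omega)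
        simpa using h1
      · rw [if_neg hc, pvLoopB, if_neg hc]
        exact (ih (i + 1) (out ++ [c]) []).2 (by omega)

-- ===== VERDICT (by name: the statement is the Claim_ definition above) =====
theorem get_beiju_spec : Claim_equal_get_beiju := by
  intro s _
  unfold Spec_get_beiju get_beiju get_beiju_alt
  have h := (loopA_eq_loopB s.toList 0 [] []).2 le_rfl
  simpa using congrArg String.ofList h
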